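-- pv_equiv track=rewrite | github.com/flypigzju/TileLevel | pattern_analyzer.py | is_rot90_sym
-- ===== SOURCE A (Python) =====
-- from typing import Dict, List, Tuple
--
-- Point = Tuple[int, int]
--
-- def bbox(points: List[Point]) -> Tuple[int, int, int, int]:
--     xs = [p[0] for p in points]
--     ys = [p[1] for p in points]
--     return min(xs), min(ys), max(xs), max(ys)
--
-- def center2_from_bbox(points: List[Point]) -> Tuple[int, int]:
--     """
--     Return (cx2, cy2) where center = (cx2/2, cy2/2)
--     Using cx2 = minx + maxx, cy2 = miny + maxy so reflection/rotation stays integer-safe.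
--     """
--     mnx, mny, mxx, mxy = bbox(points)
--     return mnx + mxx, mny + mxy
--
-- def is_rot90_sym(points: List[Point]) -> bool:
--     """
--     90° rotation symmetry about bbox center.
--     Use doubled coordinates to avoid float:
--
--       let cx2 = 2*cx, cy2 = 2*cy
--       x2 = 2*x, y2 = 2*y
--       dx2 = x2 - cx2, dy2 = y2 - cy2
--       rotate 90°: (dx2,dy2) -> (-dy2, dx2)
--       x2' = cx2 - dy2
--       y2' = cy2 + dx2
--       x' = x2'/2, y' = y2'/2
--
--     If x2' or y2' odd -> not possible in integer grid.
--     """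
--     s = set(points)
--     if not s:
--         return False
--     cx2, cy2 = center2_from_bbox(points)
--
--     for x, y in s:
--         x2 = 2 * x
--         y2 = 2 * y
--         dx2 = x2 - cx2
--         dy2 = y2 - cy2
--
--         x2r = cx2 - dy2
--         y2r = cy2 + dx2
--
--         if (x2r & 1) != 0 or (y2r & 1) != 0:
--             return False
--
--         xr = x2r // 2
--         yr = y2r // 2
--         if (xr, yr) not in s:
--             return False
--
--     return True
-- ===== SOURCE B (Python) =====
-- def is_rot90_sym(points):
--     # Orbit-following algorithm in doubled coordinates: pop a point, walk its
--     # 4-cycle under the 90-degree rotation, verifying each step lies in the set;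
--     # no parity tests or halving are needed since doubled points are even.
--     if not points:
--         return False
--     xs = [x for x, _ in points]
--     ys = [y for _, y in points]
--     sx = min(xs) + max(xs)
--     sy = min(ys) + max(ys)
--     full = {(2 * x, 2 * y) for x, y in points}
--     todo = set(full)
--     while todo:
--         q = todo.pop()
--         cur = (sx + sy - q[1], sy - sx + q[0])
--         while cur != q:
--             if cur not in full:
--                 return False
--             todo.discard(cur)
--             cur = (sx + sy - cur[1], sy - sx + cur[0])
--     return True
-- ===== Notes on version B (the rewrite author's own statement) =====
-- stated objective: alternative
-- what changed: B works entirely in doubled coordinates (so no parity test or halving exists) and replaces A's per-point rotate-and-lookup scan by an orbit-following worklist: pop a point, walk its 4-cycle under the 90-degree rotation verifying each step is in the set, and remove the whole orbit from the worklist.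
import Mathlib
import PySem

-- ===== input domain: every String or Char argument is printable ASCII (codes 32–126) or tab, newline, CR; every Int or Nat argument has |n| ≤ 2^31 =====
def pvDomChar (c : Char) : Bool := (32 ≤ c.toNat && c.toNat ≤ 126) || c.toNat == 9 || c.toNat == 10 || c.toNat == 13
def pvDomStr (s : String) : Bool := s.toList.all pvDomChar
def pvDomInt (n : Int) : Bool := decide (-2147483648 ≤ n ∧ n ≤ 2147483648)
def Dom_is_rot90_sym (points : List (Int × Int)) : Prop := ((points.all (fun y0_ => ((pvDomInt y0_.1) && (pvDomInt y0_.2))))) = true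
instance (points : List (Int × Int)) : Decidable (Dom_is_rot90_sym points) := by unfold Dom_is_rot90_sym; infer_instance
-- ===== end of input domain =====

-- B replaces A's point-by-point parity/halving/membership test by an orbit-following
-- worklist in doubled coordinates: pop a point, walk its 4-cycle under the rotation
-- verifying each step is in the set (alternative decomposition, same asymptotic cost).

-- ===== PORT A =====
-- helper bbox/center2_from_bbox: min/max over nonempty lists (nonempty guaranteed at call site)
def pvCenter2 (points : List (Int × Int)) : Int × Int :=
  let xs := points.map (fun p => p.1)
  let ys := points.map (fun p => p.2)
  (((PySem.List.min? xs (fun v => v)).getD 0) + ((PySem.List.max? xs (fun v => v)).getD 0),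
   ((PySem.List.min? ys (fun v => v)).getD 0) + ((PySem.List.max? ys (fun v => v)).getD 0))

-- the 'for x, y in s' loop with its early returns (the result is order-independent: a conjunction)
def pvLoopA (s : PySem.Set (Int × Int)) (cx2 cy2 : Int) : List (Int × Int) → Bool
  | [] => true
  | (x, y) :: rest =>
    let x2 := 2 * x
    let y2 := 2 * y
    let dx2 := x2 - cx2
    let dy2 := y2 - cy2
    let x2r := cx2 - dy2
    let y2r := cy2 + dx2
    if PySem.Int.band x2r 1 ≠ 0 ∨ PySem.Int.band y2r 1 ≠ 0 then false
    else if ¬ (PySem.Set.contains s (PySem.Int.floordiv x2r 2, PySem.Int.floordiv y2r 2)) then false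
    else pvLoopA s cx2 cy2 rest

def is_rot90_sym (points : List (Int × Int)) : Bool :=
  let s := PySem.Set.ofList points
  if s.isEmpty then false
  else
    let c := pvCenter2 points
    pvLoopA s c.1 c.2 s

-- ===== PORT B =====
-- cur = (sx + sy - cur[1], sy - sx + cur[0])
def pvRotB (sx sy : Int) (c : Int × Int) : Int × Int := (sx + sy - c.2, sy - sx + c.1)

-- inner 'while cur != q' loop; fuel 4 only makes it total (the rotation has order 4,
-- so the walk returns to q within 4 steps and the fuel is never exhausted)
def pvInnerB (full : PySem.Set (Int × Int)) (sx sy : Int) (q : Int × Int) :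
    Nat → Int × Int → PySem.Set (Int × Int) → Option (PySem.Set (Int × Int))
  | 0, _, _ => none
  | fuel + 1, cur, todo =>
    if cur = q then some todo
    else if PySem.Set.contains full cur then
      pvInnerB full sx sy q fuel (pvRotB sx sy cur) (PySem.Set.discard todo cur)
    else none

-- termination measure for the outer worklist loop (the port cites it in decreasing_by)
theorem pvInnerB_length (full : PySem.Set (Int × Int)) (sx sy : Int) (q : Int × Int) :
    ∀ (fuel : Nat) (cur : Int × Int) (todo t : PySem.Set (Int × Int)),
      pvInnerB full sx sy q fuel cur todo = some t → t.length ≤ todo.length := by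
  intro fuel
  induction fuel with
  | zero => intro cur todo t h; simp [pvInnerB] at h
  | succ n ih =>
    intro cur todo t h
    simp only [pvInnerB] at h
    split_ifs at h with h1 h2
    · cases h; exact le_refl _
    · have := ih (pvRotB sx sy cur) (PySem.Set.discard todo cur) t h
      calc t.length ≤ (PySem.Set.discard todo cur).length := this
        _ ≤ todo.length := by simp [PySem.Set.discard]; exact List.length_filter_le _ _

-- 'while todo:' — pop a point, verify and remove its whole rotation orbit
def pvOuterB (full : PySem.Set (Int × Int)) (sx sy : Int) :
    PySem.Set (Int × Int) → Bool
  | [] => true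
  | q :: rest =>
    match h : pvInnerB full sx sy q 4 (pvRotB sx sy q) rest with
    | none => false
    | some todo' => pvOuterB full sx sy todo'
  termination_by todo => todo.length
  decreasing_by
    have := pvInnerB_length full sx sy q 4 (pvRotB sx sy q) rest todo' h
    simp only [List.length_cons]; omega

def is_rot90_sym_alt (points : List (Int × Int)) : Bool :=
  if points.isEmpty then false
  else
    let xs := points.map (fun p => p.1)
    let ys := points.map (fun p => p.2)
    let sx := ((PySem.List.min? xs (fun v => v)).getD 0) + ((PySem.List.max? xs (fun v => v)).getD 0)
    let sy := ((PySem.List.min? ys (fun v => v)).getD 0) + ((PySem.List.max? ys (fun v => v)).getD 0)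
    let full := PySem.Set.ofList (points.map (fun p => (2 * p.1, 2 * p.2)))
    let todo := PySem.Set.ofList full
    pvOuterB full sx sy todo

-- ===== PRECONDITION & SPEC =====
def Spec_is_rot90_sym (points : List (Int × Int)) (out : Bool) : Prop := out = is_rot90_sym_alt points
instance (points : List (Int × Int)) (out : Bool) : Decidable (Spec_is_rot90_sym points out) := by unfold Spec_is_rot90_sym; infer_instance

-- ===== CLAIM (what is proved, stated in full; the proofs are below) =====
def Claim_equal_is_rot90_sym : Prop := ∀ (points : List (Int × Int)), Dom_is_rot90_sym points → Spec_is_rot90_sym points (is_rot90_sym points)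

-- ===== LEMMAS AND PROOFS =====

-- closure of full under the rotation: the property both programs decide
def pvClosed (full : PySem.Set (Int × Int)) (sx sy : Int) : Prop :=
  ∀ q ∈ full, pvRotB sx sy q ∈ full

-- the rotation has order 4
theorem pvRotB_four (sx sy : Int) (q : Int × Int) :
    pvRotB sx sy (pvRotB sx sy (pvRotB sx sy (pvRotB sx sy q))) = q := by
  obtain ⟨x, y⟩ := q
  simp only [pvRotB, Prod.mk.injEq]
  omega

-- A's loop is the conjunction of its per-point test
theorem pvLoopA_eq_all (s : PySem.Set (Int × Int)) (cx2 cy2 : Int) (l : List (Int × Int)) :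
    pvLoopA s cx2 cy2 l =
      l.all (fun p =>
        !(decide (PySem.Int.band (cx2 - (2 * p.2 - cy2)) 1 ≠ 0 ∨
                  PySem.Int.band (cy2 + (2 * p.1 - cx2)) 1 ≠ 0)) &&
        PySem.Set.contains s (PySem.Int.floordiv (cx2 - (2 * p.2 - cy2)) 2,
                              PySem.Int.floordiv (cy2 + (2 * p.1 - cx2)) 2)) := by
  induction l with
  | nil => simp [pvLoopA]
  | cons p rest ih =>
    obtain ⟨x, y⟩ := p
    simp only [pvLoopA, List.all_cons, ih]
    by_cases h1 : PySem.Int.band (cx2 - (2 * y - cy2)) 1 ≠ 0 ∨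
                  PySem.Int.band (cy2 + (2 * x - cx2)) 1 ≠ 0
    · simp [h1]
    · simp [h1]

-- A's per-point test says exactly: the rotated doubled point is in the doubled set
theorem pvTestA_iff (points : List (Int × Int)) (cx2 cy2 : Int) (p : Int × Int) :
    ((!(decide (PySem.Int.band (cx2 - (2 * p.2 - cy2)) 1 ≠ 0 ∨
                PySem.Int.band (cy2 + (2 * p.1 - cx2)) 1 ≠ 0)) &&
      PySem.Set.contains (PySem.Set.ofList points)
        (PySem.Int.floordiv (cx2 - (2 * p.2 - cy2)) 2,
         PySem.Int.floordiv (cy2 + (2 * p.1 - cx2)) 2)) = true) ↔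
    pvRotB cx2 cy2 (2 * p.1, 2 * p.2) ∈
      PySem.Set.ofList (points.map (fun p => (2 * p.1, 2 * p.2))) := by
  have h2 : (0 : Int) < 2 := by norm_num
  set a := cx2 - (2 * p.2 - cy2) with ha
  set b := cy2 + (2 * p.1 - cx2) with hb
  have hrot : pvRotB cx2 cy2 (2 * p.1, 2 * p.2) = (a, b) := by
    simp only [pvRotB, ha, hb, Prod.mk.injEq]; omega
  rw [hrot]
  rw [PySem.Int.band_one, PySem.Int.band_one,
      PySem.Int.mod_eq_emod_of_pos h2, PySem.Int.mod_eq_emod_of_pos h2,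
      PySem.Int.floordiv_eq_ediv_of_pos h2, PySem.Int.floordiv_eq_ediv_of_pos h2]
  simp only [Bool.and_eq_true, Bool.not_eq_eq_eq_not, Bool.not_true, decide_eq_false_iff_not,
    not_or, not_not, PySem.Set.contains_iff, PySem.Set.mem_ofList, List.mem_map]
  constructor
  · rintro ⟨⟨hea, heb⟩, hmem⟩
    exact ⟨(a / 2, b / 2), hmem, by simp only [Prod.mk.injEq]; omega⟩
  · rintro ⟨⟨x', y'⟩, hmem, heq⟩
    simp only [Prod.mk.injEq] at heq
    obtain ⟨h1, h2'⟩ := heq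
    refine ⟨⟨by omega, by omega⟩, ?_⟩
    have : (a / 2, b / 2) = (x', y') := by
      simp only [Prod.mk.injEq]; omega
    rw [this]; exact hmem

-- inner loop soundness: every element it removes (and its starting point) has its
-- rotation verified in full (or the rotation is q itself)
theorem pvInnerB_sound (full : PySem.Set (Int × Int)) (sx sy : Int) (q : Int × Int) :
    ∀ (fuel : Nat) (cur : Int × Int) (todo t : PySem.Set (Int × Int)),
      pvInnerB full sx sy q fuel cur todo = some t →
      (cur = q ∨ cur ∈ full) ∧
      (∀ x ∈ todo, x ∉ t → x ∈ full ∧ (pvRotB sx sy x = q ∨ pvRotB sx sy x ∈ full)) := by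
  intro fuel
  induction fuel with
  | zero => intro cur todo t h; simp [pvInnerB] at h
  | succ n ih =>
    intro cur todo t h
    simp only [pvInnerB] at h
    split_ifs at h with h1 h2
    · cases h
      exact ⟨Or.inl h1, fun x hx hnx => absurd hx hnx⟩
    · have hcur : cur ∈ full := Iff.mp (PySem.Set.contains_iff full cur) h2
      obtain ⟨hnext, hrest⟩ := ih (pvRotB sx sy cur) (PySem.Set.discard todo cur) t h
      refine ⟨Or.inr hcur, fun x hx hnx => ?_⟩
      by_cases hxc : x = cur
      · subst hxc
        exact ⟨hcur, hnext⟩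
      · have : x ∈ PySem.Set.discard todo cur := Iff.mpr (PySem.Set.mem_discard todo cur x) ⟨hx, hxc⟩
        exact hrest x this hnx

-- inner loop subset: the returned worklist is a subset of the input worklist
theorem pvInnerB_subset (full : PySem.Set (Int × Int)) (sx sy : Int) (q : Int × Int) :
    ∀ (fuel : Nat) (cur : Int × Int) (todo t : PySem.Set (Int × Int)),
      pvInnerB full sx sy q fuel cur todo = some t → ∀ x ∈ t, x ∈ todo := by
  intro fuel
  induction fuel with
  | zero => intro cur todo t h; simp [pvInnerB] at h
  | succ n ih =>
    intro cur todo t h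
    simp only [pvInnerB] at h
    split_ifs at h with h1 h2
    · cases h; exact fun x hx => hx
    · intro x hx
      have := ih (pvRotB sx sy cur) (PySem.Set.discard todo cur) t h x hx
      exact (Iff.mp (PySem.Set.mem_discard todo cur x) this).1

-- inner loop completeness: under closure it never fails, given enough fuel to come back to q
theorem pvInnerB_complete (full : PySem.Set (Int × Int)) (sx sy : Int) (q : Int × Int)
    (hcl : pvClosed full sx sy) :
    ∀ (fuel : Nat) (cur : Int × Int) (todo : PySem.Set (Int × Int)),
      (∃ k < fuel, (pvRotB sx sy)^[k] cur = q) → (cur = q ∨ cur ∈ full) →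
      ∃ t, pvInnerB full sx sy q fuel cur todo = some t := by
  intro fuel
  induction fuel with
  | zero => rintro cur todo ⟨k, hk, _⟩ _; omega
  | succ n ih =>
    rintro cur todo ⟨k, hk, hkq⟩ hcur
    by_cases h1 : cur = q
    · exact ⟨todo, by simp [pvInnerB, h1]⟩
    · have hcf : cur ∈ full := hcur.resolve_left h1
      have hk0 : k ≠ 0 := by rintro rfl; exact h1 hkq
      obtain ⟨k', rfl⟩ : ∃ k', k = k' + 1 := ⟨k - 1, by omega⟩
      have hnext : (pvRotB sx sy)^[k'] (pvRotB sx sy cur) = q := by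
        rw [← Function.iterate_succ_apply]; exact hkq
      obtain ⟨t, ht⟩ := ih (pvRotB sx sy cur) (PySem.Set.discard todo cur)
        ⟨k', by omega, hnext⟩ (Or.inr (hcl cur hcf))
      refine ⟨t, ?_⟩
      simp only [pvInnerB, if_neg h1]
      rw [if_pos (Iff.mpr (PySem.Set.contains_iff full cur) hcf)]
      exact ht

-- outer loop soundness
theorem pvOuterB_sound (full : PySem.Set (Int × Int)) (sx sy : Int) :
    ∀ (todo : PySem.Set (Int × Int)),
      pvOuterB full sx sy todo = true →
      (∀ x ∈ todo, x ∈ full) →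
      (∀ x ∈ full, x ∉ todo → pvRotB sx sy x ∈ full) →
      pvClosed full sx sy := by
  intro todo
  induction todo using pvOuterB.induct full sx sy with
  | case1 => intro _ _ hinv x hx; exact hinv x hx (by simp)
  | case2 q rest h =>
    intro houter
    rw [pvOuterB, h] at houter
    exact absurd houter (by simp)
  | case3 q rest t h ih =>
    intro houter hsub hinv
    rw [pvOuterB, h] at houter
    obtain ⟨hfirst, hremoved⟩ := pvInnerB_sound full sx sy q 4 (pvRotB sx sy q) rest t h
    have hq : q ∈ full := hsub q (by simp)
    apply ih houter
    · intro x hx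
      exact hsub x (List.mem_cons_of_mem q (pvInnerB_subset full sx sy q 4 _ rest t h x hx))
    · intro x hxf hxt
      by_cases hxtodo : x ∈ q :: rest
      · rcases List.mem_cons.mp hxtodo with rfl | hxr
        · rcases hfirst with heq | hmem
          · rw [heq]; exact hq
          · exact hmem
        · rcases (hremoved x hxr hxt).2 with heq | hmem
          · rw [heq]; exact hq
          · exact hmem
      · exact hinv x hxf hxtodo

-- outer loop completeness
theorem pvOuterB_complete (full : PySem.Set (Int × Int)) (sx sy : Int)
    (hcl : pvClosed full sx sy) :
    ∀ (todo : PySem.Set (Int × Int)),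
      (∀ x ∈ todo, x ∈ full) → pvOuterB full sx sy todo = true := by
  intro todo
  induction todo using pvOuterB.induct full sx sy with
  | case1 => intro _; simp [pvOuterB]
  | case3 q rest t h ih =>
    intro hsub
    rw [pvOuterB, h]
    apply ih
    intro x hx
    exact hsub x (List.mem_cons_of_mem q (pvInnerB_subset full sx sy q 4 _ rest t h x hx))
  | case2 q rest h =>
    intro hsub
    have hq : q ∈ full := hsub q (by simp)
    have hk : ∃ k < 4, (pvRotB sx sy)^[k] (pvRotB sx sy q) = q := by
      refine ⟨3, by omega, ?_⟩
      show (pvRotB sx sy)^[3] (pvRotB sx sy q) = q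
      simp only [Function.iterate_succ, Function.iterate_zero, Function.comp_apply, id_eq]
      exact pvRotB_four sx sy q
    obtain ⟨t, ht⟩ := pvInnerB_complete full sx sy q hcl 4 (pvRotB sx sy q) rest hk
      (Or.inr (hcl q hq))
    rw [ht] at h
    cases h

-- B's outer loop started on the full set decides closure
theorem pvOuterB_iff (full : PySem.Set (Int × Int)) (sx sy : Int) :
    pvOuterB full sx sy full = true ↔ pvClosed full sx sy :=
  ⟨fun h => pvOuterB_sound full sx sy full h (fun _ hx => hx) (fun _ hx hnx => absurd hx hnx),
   fun hcl => pvOuterB_complete full sx sy hcl full (fun _ hx => hx)⟩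

-- ===== VERDICT (by name: the statement is the Claim_ definition above) =====
theorem is_rot90_sym_spec : Claim_equal_is_rot90_sym := by
  intro points _
  unfold Spec_is_rot90_sym is_rot90_sym is_rot90_sym_alt
  simp only []
  by_cases hemp : points = []
  · subst hemp; rfl
  · have hs : (PySem.Set.ofList points).isEmpty = false := by
      cases points with
      | nil => exact absurd rfl hemp
      | cons p rest => simp [PySem.Set.ofList_cons]
    have hl : points.isEmpty = false := by
      cases points with
      | nil => exact absurd rfl hemp
      | cons p rest => rfl
    rw [hs, hl]
    simp only [Bool.false_eq_true, if_false]
    set cx2 := ((PySem.List.min? (points.map (fun p => p.1)) (fun v => v)).getD 0) +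
               ((PySem.List.max? (points.map (fun p => p.1)) (fun v => v)).getD 0) with hcx
    set cy2 := ((PySem.List.min? (points.map (fun p => p.2)) (fun v => v)).getD 0) +
               ((PySem.List.max? (points.map (fun p => p.2)) (fun v => v)).getD 0) with hcy
    have hc : pvCenter2 points = (cx2, cy2) := rfl
    rw [hc]
    set full := PySem.Set.ofList (points.map (fun p => (2 * p.1, 2 * p.2))) with hfull
    have hnodup : full.Nodup := PySem.Set.nodup_ofList _
    have htodo : PySem.Set.ofList full = full := PySem.Set.ofList_eq_self_of_nodup _ hnodup
    rw [htodo]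
    apply Bool.eq_iff_iff.mpr
    rw [pvOuterB_iff full cx2 cy2]
    rw [pvLoopA_eq_all]
    simp only [List.all_eq_true]
    constructor
    · intro hall q hq
      rw [hfull, PySem.Set.mem_ofList, List.mem_map] at hq
      obtain ⟨p, hp, rfl⟩ := hq
      have hps : p ∈ PySem.Set.ofList points := by
        rw [PySem.Set.mem_ofList]; exact hp
      exact (pvTestA_iff points cx2 cy2 p).mp (hall p hps)
    · intro hcl p hp
      apply (pvTestA_iff points cx2 cy2 p).mpr
      apply hcl
      rw [hfull, PySem.Set.mem_ofList, List.mem_map]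
      rw [PySem.Set.mem_ofList] at hp
      exact ⟨p, hp, rfl⟩
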